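-- pv_equiv track=rewrite | github.com/paul5404/Python_coding | main.py | vocaCheck
-- ===== SOURCE A (Python) =====
-- def vocaCheck(strings):
--     cnt = 0
--
--     for string in strings:
--         temp = []
--         flag = 1
--
--         letter = string[0]
--         temp.append(letter)
--
--         for s in string:
--             if s == letter:
--                 continue
--             elif s not in temp:
--                 temp.append(s)
--                 letter = s
--             else:
--                 flag = 0
--                 break
--
--         if flag:
--             cnt += 1
--
--     return cnt
-- ===== SOURCE B (Python) =====
-- def vocaCheck(strings):
--     cnt = 0
--     for s in strings:
--         runs = []
--         for c in s:
--             if not runs or runs[-1] != c: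
--                 runs.append(c)
--         if len(runs) == len(set(s)):
--             cnt += 1
--     return cnt
-- ===== Notes on version B (the rewrite author's own statement) =====
-- stated objective: simpler
-- what changed: B counts a string as valid iff its run-length-compressed key sequence has exactly as many runs as the string has distinct characters, replacing A's seen-list scan with an interrupted-run flag and break.
import Mathlib
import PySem

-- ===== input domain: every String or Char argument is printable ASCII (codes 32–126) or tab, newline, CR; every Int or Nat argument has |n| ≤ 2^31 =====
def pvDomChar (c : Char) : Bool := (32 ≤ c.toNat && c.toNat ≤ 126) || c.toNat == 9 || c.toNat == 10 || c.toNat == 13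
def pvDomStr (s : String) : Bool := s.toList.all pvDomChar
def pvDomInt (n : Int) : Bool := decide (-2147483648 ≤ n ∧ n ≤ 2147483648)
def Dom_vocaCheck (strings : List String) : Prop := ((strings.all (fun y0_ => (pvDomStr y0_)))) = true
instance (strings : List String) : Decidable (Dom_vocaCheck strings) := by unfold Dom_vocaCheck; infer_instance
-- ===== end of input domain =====

-- B changes the per-string test to a run-length-compression count (simpler, no inner membership scan);
-- equivalence is about the return value only.

-- ===== PORT A =====
-- inner 'for s in string' loop after the first-character setup: temp is the seen list, letter the current run char;
-- returns the final flag (true = 1).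
def vocaCheckInner : List Char → List Char → Char → Bool
  | [], _, _ => true
  | c :: cs, temp, letter =>
    if c = letter then vocaCheckInner cs temp letter
    else if ¬ temp.contains c then vocaCheckInner cs (temp ++ [c]) c
    else false

def vocaCheck (strings : List String) : Int :=
  strings.foldl (fun cnt string =>
    match string.toList with
    | [] => cnt   -- Python raises IndexError at string[0]; excluded by Pre_
    | c :: _ => if vocaCheckInner string.toList [c] c then cnt + 1 else cnt) 0

-- ===== PORT B =====
def vocaCheck_alt (strings : List String) : Int :=
  strings.foldl (fun cnt s =>
    let runs := s.toList.foldl (fun rs c => if rs ≠ [] ∧ rs.getLast? = some c then rs else rs ++ [c]) []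
    if runs.length = (PySem.Set.ofList s.toList).length then cnt + 1 else cnt) 0

-- ===== PRECONDITION & SPEC =====
-- Pre_ excludes lists containing an empty string, on which A raises IndexError at string[0].
def Pre_vocaCheck (strings : List String) : Prop := ∀ s ∈ strings, s ≠ ""
instance (strings : List String) : Decidable (Pre_vocaCheck strings) := by unfold Pre_vocaCheck; infer_instance
def pvWitness_vocaCheck : List String := (["aab", "aba", "xyz"])

def Spec_vocaCheck (strings : List String) (out : Int) : Prop := out = vocaCheck_alt strings
instance (strings : List String) (out : Int) : Decidable (Spec_vocaCheck strings out) := by unfold Spec_vocaCheck; infer_instance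

-- ===== CLAIM (what is proved, stated in full; the proofs are below) =====
def Claim_equal_vocaCheck : Prop := ∀ (strings : List String), Dom_vocaCheck strings → Pre_vocaCheck strings → Spec_vocaCheck strings (vocaCheck strings)

-- ===== LEMMAS AND PROOFS =====

-- run-length-compressed key sequence of `cs`, given the current run character `letter` (the key of the
-- run just before `cs`), excluding that current run itself
def pvRuns : Char → List Char → List Char
  | _, [] => []
  | letter, c :: cs => if c = letter then pvRuns letter cs else c :: pvRuns c cs

lemma pvRuns_same (c : Char) (cs : List Char) : pvRuns c (c :: cs) = pvRuns c cs := by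
  simp [pvRuns]

lemma pvRuns_ne (letter c : Char) (cs : List Char) (h : c ≠ letter) :
    pvRuns letter (c :: cs) = c :: pvRuns c cs := by
  simp [pvRuns, h]

lemma pvRuns_mem (letter : Char) (cs : List Char) (x : Char) :
    x ∈ letter :: pvRuns letter cs ↔ x ∈ letter :: cs := by
  induction cs generalizing letter with
  | nil => rfl
  | cons c cs ih =>
    by_cases h : c = letter
    · subst h
      rw [pvRuns_same, ih]
      simp only [List.mem_cons]
      tauto
    · rw [pvRuns_ne letter c cs h]
      have := ih c
      simp only [List.mem_cons] at *
      tauto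

lemma vocaCheckInner_iff (cs : List Char) (temp : List Char) (letter : Char)
    (hmem : letter ∈ temp) :
    vocaCheckInner cs temp letter = true ↔
      ((pvRuns letter cs).Nodup ∧ ∀ x ∈ pvRuns letter cs, x ∉ temp) := by
  induction cs generalizing temp letter with
  | nil => simp [vocaCheckInner, pvRuns]
  | cons c cs ih =>
    by_cases h : c = letter
    · subst h
      have e : vocaCheckInner (c :: cs) temp c = vocaCheckInner cs temp c := by
        simp [vocaCheckInner]
      rw [e, pvRuns_same]
      exact ih temp c hmem
    · by_cases hc : temp.contains c
      · have hcm : c ∈ temp := by simpa using hc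
        have e : vocaCheckInner (c :: cs) temp letter = false := by
          simp [vocaCheckInner, h, hcm]
        rw [e, pvRuns_ne letter c cs h]
        simp only [Bool.false_eq_true, false_iff, not_and]
        intro _ hall
        exact hall c (by simp) hcm
      · have hcm : c ∉ temp := by simpa using hc
        have e : vocaCheckInner (c :: cs) temp letter = vocaCheckInner cs (temp ++ [c]) c := by
          simp [vocaCheckInner, h, hcm]
        rw [e, pvRuns_ne letter c cs h, ih (temp ++ [c]) c (by simp)]
        simp only [List.nodup_cons, List.mem_cons, List.mem_append, not_or]
        constructor
        · rintro ⟨hnd, hall⟩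
          refine ⟨⟨fun hcr => (hall c hcr).2.1 rfl, hnd⟩, ?_⟩
          rintro x (rfl | hx)
          · exact hcm
          · exact (hall x hx).1
        · rintro ⟨⟨hcr, hnd⟩, hall⟩
          exact ⟨hnd, fun x hx => ⟨hall x (Or.inr hx), fun hxe => hcr (hxe ▸ hx), by simp⟩⟩

-- B's foldl builds exactly c :: pvRuns c cs
lemma pvRuns_foldl_aux (cs : List Char) (acc : List Char) (c : Char) :
    (cs.foldl (fun rs ch => if rs ≠ [] ∧ rs.getLast? = some ch then rs else rs ++ [ch]) (acc ++ [c]))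
      = acc ++ c :: pvRuns c cs := by
  induction cs generalizing acc c with
  | nil => simp [pvRuns]
  | cons d cs ih =>
    simp only [List.foldl_cons]
    by_cases h : d = c
    · subst h
      rw [if_pos (by simp)]
      rw [pvRuns_same]
      exact ih acc d
    · rw [if_neg (by simp; tauto)]
      rw [pvRuns_ne c d cs h]
      have := ih (acc ++ [c]) d
      simpa using this

lemma pvRuns_foldl (cs : List Char) (c : Char) :
    ((c :: cs).foldl (fun rs ch => if rs ≠ [] ∧ rs.getLast? = some ch then rs else rs ++ [ch]) [])
      = c :: pvRuns c cs := by
  simp only [List.foldl_cons]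
  rw [if_neg (by simp)]
  simpa using pvRuns_foldl_aux cs [] c

-- nodup of the full run sequence  ↔  run count = distinct-char count
lemma runs_nodup_iff_length (c : Char) (cs : List Char) :
    (c :: pvRuns c cs).Nodup ↔
      (c :: pvRuns c cs).length = (PySem.Set.ofList (c :: cs)).length := by
  have hmem : ∀ x, x ∈ c :: pvRuns c cs ↔ x ∈ PySem.Set.ofList (c :: cs) := by
    intro x
    rw [PySem.Set.mem_ofList]
    exact pvRuns_mem c cs x
  have hsetnd : (PySem.Set.ofList (c :: cs)).Nodup := PySem.Set.nodup_ofList _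
  constructor
  · intro hnd
    exact (List.perm_ext_iff_of_nodup hnd hsetnd |>.2 hmem).length_eq
  · intro hlen
    by_contra hnd
    have hd : (c :: pvRuns c cs).dedup.Nodup := List.nodup_dedup _
    have hdm : ∀ x, x ∈ (c :: pvRuns c cs).dedup ↔ x ∈ PySem.Set.ofList (c :: cs) := by
      intro x; rw [List.mem_dedup]; exact hmem x
    have hperm := (List.perm_ext_iff_of_nodup hd hsetnd).2 hdm
    have hlen2 : (c :: pvRuns c cs).dedup.length = (PySem.Set.ofList (c :: cs)).length :=
      hperm.length_eq
    have hsub : (c :: pvRuns c cs).dedup.Sublist (c :: pvRuns c cs) := List.dedup_sublist _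
    have heq : (c :: pvRuns c cs).dedup = (c :: pvRuns c cs) :=
      hsub.eq_of_length (by omega)
    exact hnd (heq ▸ hd)

lemma step_eq (s : String) (hs : s ≠ "") (cnt : Int) :
    (match s.toList with
      | [] => cnt
      | c :: _ => if vocaCheckInner s.toList [c] c then cnt + 1 else cnt) =
    (let runs := s.toList.foldl (fun rs c => if rs ≠ [] ∧ rs.getLast? = some c then rs else rs ++ [c]) []
     if runs.length = (PySem.Set.ofList s.toList).length then cnt + 1 else cnt) := by
  have hne : s.toList ≠ [] := by
    simp only [ne_eq, String.toList_eq_nil_iff]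
    exact hs
  cases hlist : s.toList with
  | nil => exact absurd hlist hne
  | cons c cs =>
    show (if vocaCheckInner (c :: cs) [c] c then cnt + 1 else cnt) =
      (if ((c :: cs).foldl (fun rs ch => if rs ≠ [] ∧ rs.getLast? = some ch then rs else rs ++ [ch]) []).length
          = (PySem.Set.ofList (c :: cs)).length then cnt + 1 else cnt)
    rw [pvRuns_foldl cs c]
    have h1 : vocaCheckInner (c :: cs) [c] c = true ↔
        ((pvRuns c cs).Nodup ∧ ∀ x ∈ pvRuns c cs, x ∉ ([c] : List Char)) := by
      rw [vocaCheckInner_iff (c :: cs) [c] c (by simp), pvRuns_same]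
    have h2 : (((pvRuns c cs).Nodup ∧ ∀ x ∈ pvRuns c cs, x ∉ ([c] : List Char))) ↔
        (c :: pvRuns c cs).Nodup := by
      simp only [List.nodup_cons, List.mem_singleton]
      constructor
      · rintro ⟨hnd, hall⟩
        exact ⟨fun hc => hall c hc (by simp), hnd⟩
      · rintro ⟨hc, hnd⟩
        refine ⟨hnd, fun x hx hxc => ?_⟩
        have hxe : x = c := by simpa using hxc
        exact hc (hxe ▸ hx)
    by_cases hv : vocaCheckInner (c :: cs) [c] c = true
    · rw [if_pos hv]
      have hl := (runs_nodup_iff_length c cs).1 (h2.1 (h1.1 hv))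
      rw [if_pos hl]
    · rw [if_neg hv]
      rw [if_neg (fun hlen => hv (h1.2 (h2.2 ((runs_nodup_iff_length c cs).2 hlen))))]

-- ===== VERDICT (by name: the statement is the Claim_ definition above) =====
theorem vocaCheck_spec : Claim_equal_vocaCheck := by
  intro strings _ hpre
  unfold Spec_vocaCheck vocaCheck vocaCheck_alt
  apply PySem.List.foldl_congr_mem
  intro cnt s hs
  exact step_eq s (hpre s hs) cnt
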